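-- pv_equiv track=rewrite | github.com/xiongxoy/CornerExtraction | research/corner/corner_extraction.py | rename_indexes
-- ===== SOURCE A (Python) =====
-- def rename_indexes(indexes):
--     '''
--     将indexes中的元素重命名，
--     例如[2, 2, 3, 3, 1, 2]会重命名为[0, 0, 1, 1, 2, 0]
--     @param indexes:
--     @return: renamed indexes
--     '''
--     assert isinstance(indexes, list)
--     name_map = {}
--     c = 0
--     indexes_ret = []
--     for i in indexes:
--         if i not in name_map:
--             name_map[i] = c
--             c = c + 1
--         indexes_ret.append(name_map[i])
--     return indexes_ret
-- ===== SOURCE B (Python) =====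
-- def rename_indexes(indexes):
--     '''Relabel by rank: record each value's first position via a reversed
--     overwrite pass, sort the distinct values by that position, and label each
--     element by its rank in that sorted order.'''
--     assert isinstance(indexes, list)
--     firsts = {v: p for p, v in reversed(list(enumerate(indexes)))}
--     order = sorted(firsts, key=firsts.get)
--     rank = {v: r for r, v in enumerate(order)}
--     return [rank[v] for v in indexes]
-- ===== Notes on version B (the rewrite author's own statement) =====
-- stated objective: alternative
-- what changed: B replaces A's fused single pass (membership test, running counter, map and output grown together) with a staged rank computation: a reversed overwrite pass records each value's first position, the distinct values are sorted by that position, and each element is labeled by its rank in that sorted order.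
import Mathlib
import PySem

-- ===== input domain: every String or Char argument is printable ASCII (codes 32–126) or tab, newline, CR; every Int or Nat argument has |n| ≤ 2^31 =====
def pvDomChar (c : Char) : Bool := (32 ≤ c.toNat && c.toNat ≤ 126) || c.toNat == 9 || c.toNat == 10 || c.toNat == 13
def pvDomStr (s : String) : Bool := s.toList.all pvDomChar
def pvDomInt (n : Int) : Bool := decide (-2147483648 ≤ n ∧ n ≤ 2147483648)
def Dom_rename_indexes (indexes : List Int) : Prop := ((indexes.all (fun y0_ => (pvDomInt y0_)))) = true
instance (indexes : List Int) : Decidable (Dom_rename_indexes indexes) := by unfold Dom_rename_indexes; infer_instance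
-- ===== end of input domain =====

-- B drops A's fused dict/counter loop: it records first positions by a reversed
-- overwrite pass, sorts the distinct values by first position, and labels by rank.

-- ===== PORT A =====
-- loop state: (name_map, c, indexes_ret); name_map[i] after the branch always
-- exists, so the total getD 0 is exact for Python's name_map[i]
def rename_indexes (indexes : List Int) : List Int :=
  (indexes.foldl
    (fun (st : PySem.Dict Int Int × Int × List Int) i =>
      let nm := if st.1.contains i then st.1 else st.1.insert i st.2.1
      let c := if st.1.contains i then st.2.1 else st.2.1 + 1
      (nm, c, st.2.2 ++ [nm.getD i 0]))
    (PySem.Dict.empty, 0, [])).2.2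

-- ===== PORT B =====
-- dict comprehensions are folds of overwriting inserts; firsts.get(v) and rank[v]
-- always find their key (membership), so the total getD 0 is exact; the sort keys
-- (first positions) are distinct, so sorted over the dict's keys is exact
def rename_indexes_alt (indexes : List Int) : List Int :=
  let firsts := ((PySem.List.enumerate indexes).reverse).foldl
      (fun (d : PySem.Dict Int Int) pv => d.insert pv.2 pv.1) PySem.Dict.empty
  let order := PySem.List.sorted firsts.keys (fun v => firsts.getD v 0)
  let rank := PySem.Dict.ofList ((PySem.List.enumerate order).map (fun p => (p.2, p.1)))
  indexes.map (fun v => rank.getD v 0)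

-- ===== PRECONDITION & SPEC =====
def Spec_rename_indexes (indexes : List Int) (out : List Int) : Prop := out = rename_indexes_alt indexes
instance (indexes : List Int) (out : List Int) : Decidable (Spec_rename_indexes indexes out) := by unfold Spec_rename_indexes; infer_instance

-- ===== CLAIM (what is proved, stated in full; the proofs are below) =====
def Claim_equal_rename_indexes : Prop := ∀ (indexes : List Int), Dom_rename_indexes indexes → Spec_rename_indexes indexes (rename_indexes indexes)

-- ===== LEMMAS AND PROOFS =====

-- the index of an already-seen value is unchanged by further Set.add's
theorem index?_update_of_mem (xs : List Int) (s : PySem.Set Int) (v : Int) (hv : v ∈ s) :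
    PySem.List.index? (PySem.Set.update s xs) v = PySem.List.index? s v := by
  induction xs generalizing s with
  | nil => rfl
  | cons x xs ih =>
    show PySem.List.index? (PySem.Set.update (PySem.Set.add s x) xs) v = _
    by_cases hx : x ∈ s
    · rw [ih _ (by simpa [PySem.Set.add, hx] using hv)]
      simp [PySem.Set.add, hx]
    · rw [ih _ (by simp [PySem.Set.add, hx, hv])]
      rw [show PySem.Set.add s x = s ++ [x] from by simp [PySem.Set.add, hx]]
      exact PySem.List.index?_append_of_mem _ hv

-- main invariant for A: the fold over xs from a state describing the seen-set s
theorem fold_invariant (xs : List Int) (s : PySem.Set Int) (nm : PySem.Dict Int Int)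
    (ret : List Int)
    (hc : ∀ v, nm.contains v = true ↔ v ∈ s)
    (hg : ∀ v, nm.getD v 0 = (((PySem.List.index? s v).getD 0 : Nat) : Int)) :
    (xs.foldl
      (fun (st : PySem.Dict Int Int × Int × List Int) i =>
        let nm := if st.1.contains i then st.1 else st.1.insert i st.2.1
        let c := if st.1.contains i then st.2.1 else st.2.1 + 1
        (nm, c, st.2.2 ++ [nm.getD i 0]))
      (nm, (s.length : Int), ret)).2.2
    = ret ++ xs.map (fun i =>
        (((PySem.List.index? (PySem.Set.update s xs) i).getD 0 : Nat) : Int)) := by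
  induction xs generalizing s nm ret with
  | nil => simp
  | cons x xs ih =>
    simp only [List.foldl_cons, List.map_cons]
    by_cases hx : x ∈ s
    · have hcx : nm.contains x = true := (hc x).mpr hx
      have hupd : PySem.Set.update s (x :: xs) = PySem.Set.update s xs := by
        simp [PySem.Set.update, PySem.Set.add, hx]
      have hix : PySem.List.index? (PySem.Set.update s xs) x = PySem.List.index? s x :=
        index?_update_of_mem xs s x hx
      rw [hupd, hix, ← hg x]
      simpa [hcx] using ih s nm (ret ++ [nm.getD x 0]) hc hg
    · have hcx : nm.contains x = false := by
        rw [Bool.eq_false_iff]; intro h; exact hx ((hc x).mp h)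
      have hxidx : PySem.List.index? (s ++ [x]) x = some s.length :=
        PySem.List.index?_append_singleton_self s x hx
      have hupd : PySem.Set.update s (x :: xs) = PySem.Set.update (s ++ [x]) xs := by
        simp [PySem.Set.update, PySem.Set.add, hx]
      have hc' : ∀ v, (nm.insert x (s.length : Int)).contains v = true ↔ v ∈ s ++ [x] := by
        intro v
        rw [PySem.Dict.contains_insert]
        by_cases hvx : v = x <;> simp [hvx, hc v]
      have hg' : ∀ v, (nm.insert x (s.length : Int)).getD v 0
          = (((PySem.List.index? (s ++ [x]) v).getD 0 : Nat) : Int) := by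
        intro v
        rw [PySem.Dict.getD_insert]
        by_cases hvx : v = x
        · subst hvx; rw [if_pos rfl, hxidx]; simp
        · rw [if_neg hvx, hg v]
          by_cases hvs : v ∈ s
          · rw [PySem.List.index?_append_of_mem _ hvs]
          · have h1 : PySem.List.index? s v = none :=
              (PySem.List.index?_eq_none_iff _ _).mpr hvs
            have h2 : PySem.List.index? (s ++ [x]) v = none := by
              rw [PySem.List.index?_eq_none_iff _ _]
              simp [hvs, hvx]
            rw [h1, h2]
      have hxfinal : PySem.List.index? (PySem.Set.update (s ++ [x]) xs) x = some s.length := by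
        rw [index?_update_of_mem _ _ _ (by simp), hxidx]
      rw [hupd, hxfinal]
      have h := ih (s ++ [x]) (nm.insert x (s.length : Int))
        (ret ++ [(nm.insert x (s.length : Int)).getD x 0]) hc' hg'
      rw [hg' x, hxidx] at h
      simpa [hcx] using h

-- the first-occurrence indices are strictly increasing along the dedup list
theorem dedup_pairwise_index (xs : List Int) :
    (PySem.List.dedup xs).Pairwise (fun a b =>
      ((PySem.List.index? xs a).getD 0) < ((PySem.List.index? xs b).getD 0)) := by
  induction xs using List.reverseRecOn with
  | nil => simp [PySem.List.dedup]
  | append_singleton l x ih =>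
    have hded : PySem.List.dedup (l ++ [x])
        = if x ∈ PySem.List.dedup l then PySem.List.dedup l else PySem.List.dedup l ++ [x] := by
      simp [PySem.List.dedup_eq_ofList, PySem.Set.ofList_eq_foldl, List.foldl_append,
        PySem.Set.add]
    have hkey : ∀ v ∈ PySem.List.dedup l,
        PySem.List.index? (l ++ [x]) v = PySem.List.index? l v := by
      intro v hv
      exact PySem.List.index?_append_of_mem _ ((PySem.List.mem_dedup _ _).mp hv)
    by_cases hx : x ∈ PySem.List.dedup l
    · rw [hded, if_pos hx]
      exact List.Pairwise.imp_of_mem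
        (fun {a b} ha hb h => by rw [hkey a ha, hkey b hb]; exact h) ih
    · rw [hded, if_neg hx]
      have hxl : x ∉ l := fun h => hx ((PySem.List.mem_dedup _ _).mpr h)
      apply List.pairwise_append.mpr
      refine ⟨List.Pairwise.imp_of_mem
        (fun {a b} ha hb h => by rw [hkey a ha, hkey b hb]; exact h) ih, by simp, ?_⟩
      intro a ha b hb
      rw [List.mem_singleton] at hb
      rw [hkey a ha, hb, PySem.List.index?_append_singleton_self l x hxl]
      have hal : a ∈ l := (PySem.List.mem_dedup _ _).mp ha
      have := PySem.List.index?_isSome_iff l a |>.mpr hal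
      obtain ⟨k, hk⟩ := Option.isSome_iff_exists.mp this
      obtain ⟨hklt, -, -⟩ := PySem.List.getElem_of_index?_eq_some hk
      rw [hk]
      simpa using hklt

-- the reversed-overwrite pass leaves each member's FIRST position in the dict
theorem firsts_getD (xs : List Int) (s : Int) (v : Int) (hv : v ∈ xs) :
    (((PySem.List.enumerate xs s).reverse).foldl
        (fun (d : PySem.Dict Int Int) pv => d.insert pv.2 pv.1) PySem.Dict.empty).getD v 0
      = s + (((PySem.List.index? xs v).getD 0 : Nat) : Int) := by
  induction xs generalizing s with
  | nil => cases hv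
  | cons x xs ih =>
    rw [PySem.List.enumerate_cons, List.reverse_cons, List.foldl_append]
    simp only [List.foldl_cons, List.foldl_nil]
    rw [PySem.Dict.getD_insert]
    by_cases hvx : v = x
    · rw [if_pos hvx, hvx, PySem.List.index?_cons_self]
      simp
    · rw [if_neg hvx]
      have hvxs : v ∈ xs := by
        cases List.mem_cons.mp hv with
        | inl h => exact absurd h hvx
        | inr h => exact h
      rw [ih (s + 1) hvxs, PySem.List.index?_cons_of_ne _ (Ne.symm hvx)]
      obtain ⟨k, hk⟩ := Option.isSome_iff_exists.mp
        ((PySem.List.index?_isSome_iff xs v).mpr hvxs)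
      rw [hk]
      simp
      omega

-- the keys of the reversed-overwrite dict are the distinct values of the reversed list
theorem firsts_keys (xs : List Int) (s : Int) :
    (((PySem.List.enumerate xs s).reverse).foldl
        (fun (d : PySem.Dict Int Int) pv => d.insert pv.2 pv.1) PySem.Dict.empty).keys
      = PySem.List.dedup xs.reverse := by
  have h : (((PySem.List.enumerate xs s).reverse).foldl
        (fun (d : PySem.Dict Int Int) pv => d.insert pv.2 pv.1) PySem.Dict.empty).keys
      = PySem.Set.update (PySem.Dict.empty : PySem.Dict Int Int).keys
          (((PySem.List.enumerate xs s).reverse).map (fun pv => pv.2)) :=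
    PySem.Dict.keys_foldl_insert_key _ (fun pv : Int × Int => pv.2) (fun (_ : PySem.Dict Int Int) (pv : Int × Int) => pv.1) _
  rw [h, show (PySem.List.enumerate xs s).reverse.map (fun pv => pv.2)
        = xs.reverse from by rw [List.map_reverse, PySem.List.map_snd_enumerate]]
  rw [PySem.List.dedup_eq_ofList]
  rfl

-- sorting the dict's keys by stored first position gives the first-occurrence order
theorem sorted_firsts_eq_dedup (xs : List Int) :
    (PySem.List.sorted
      (((PySem.List.enumerate xs 0).reverse).foldl
          (fun (d : PySem.Dict Int Int) pv => d.insert pv.2 pv.1) PySem.Dict.empty).keys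
      (fun v => (((PySem.List.enumerate xs 0).reverse).foldl
          (fun (d : PySem.Dict Int Int) pv => d.insert pv.2 pv.1) PySem.Dict.empty).getD v 0))
    = PySem.List.dedup xs := by
  rw [firsts_keys]
  apply PySem.List.sorted_eq_of_perm_of_pairwise_lt
  · exact (List.perm_ext_iff_of_nodup (PySem.List.nodup_dedup _)
      (PySem.List.nodup_dedup _)).mpr
      (fun a => by rw [PySem.List.mem_dedup, PySem.List.mem_dedup, List.mem_reverse])
  · refine List.Pairwise.imp_of_mem (fun {a b} ha hb h => ?_) (dedup_pairwise_index xs)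
    rw [firsts_getD xs 0 a ((PySem.List.mem_dedup _ _).mp ha),
        firsts_getD xs 0 b ((PySem.List.mem_dedup _ _).mp hb)]
    simpa using h

-- the enumerated first-occurrence dict looks a value up at its index
theorem getD_ofList_enumerate (l : List Int) (hnd : l.Nodup) (v : Int) :
    (PySem.Dict.ofList ((PySem.List.enumerate l).map (fun p => (p.2, p.1)))).getD v 0
      = (((PySem.List.index? l v).getD 0 : Nat) : Int) := by
  induction l using List.reverseRecOn with
  | nil => simp [PySem.List.enumerate_nil, PySem.Dict.ofList, PySem.Dict.update,
      PySem.Dict.getD_empty, PySem.List.index?]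
  | append_singleton l x ih =>
    obtain ⟨hnd', -, hdisj⟩ := List.nodup_append.mp hnd
    have hx : x ∉ l := fun h => hdisj x h x (List.mem_singleton.mpr rfl) rfl
    rw [PySem.List.enumerate_append l [x] 0, PySem.List.enumerate_cons,
      PySem.List.enumerate_nil]
    rw [show ((PySem.List.enumerate l 0 ++ [(0 + (l.length : Int), x)]).map
          (fun p => (p.2, p.1)))
        = ((PySem.List.enumerate l 0).map (fun p => (p.2, p.1)))
            ++ [(x, 0 + (l.length : Int))] from by simp]
    rw [show PySem.Dict.ofList
          (((PySem.List.enumerate l 0).map (fun p => (p.2, p.1)))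
            ++ [(x, 0 + (l.length : Int))])
        = (PySem.Dict.ofList
            ((PySem.List.enumerate l 0).map (fun p => (p.2, p.1)))).insert x
              (0 + (l.length : Int)) from by
      simp [PySem.Dict.ofList, PySem.Dict.update, List.foldl_append]]
    rw [PySem.Dict.getD_insert]
    by_cases hvx : v = x
    · subst hvx
      rw [if_pos rfl, PySem.List.index?_append_singleton_self l v hx]
      simp
    · rw [if_neg hvx, ih hnd']
      by_cases hvs : v ∈ l
      · rw [PySem.List.index?_append_of_mem _ hvs]
      · rw [(PySem.List.index?_eq_none_iff _ _).mpr hvs,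
          (PySem.List.index?_eq_none_iff _ _).mpr (by simp [hvs, hvx])]

-- ===== VERDICT (by name: the statement is the Claim_ definition above) =====
theorem rename_indexes_spec : Claim_equal_rename_indexes := by
  intro indexes _
  show rename_indexes indexes = rename_indexes_alt indexes
  unfold rename_indexes rename_indexes_alt
  simp only [sorted_firsts_eq_dedup]
  have hb : ∀ i : Int,
      (PySem.Dict.ofList ((PySem.List.enumerate (PySem.List.dedup indexes)).map
          (fun p => (p.2, p.1)))).getD i 0
        = (((PySem.List.index? (PySem.List.dedup indexes) i).getD 0 : Nat) : Int) :=
    fun i => getD_ofList_enumerate _ (PySem.List.nodup_dedup _) i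
  simp only [hb]
  have h := fold_invariant indexes [] PySem.Dict.empty []
    (by intro v; simp [PySem.Dict.contains_empty])
    (by intro v; simp [PySem.Dict.getD_empty])
  simpa [PySem.List.dedup_eq_ofList, PySem.Set.ofList_eq_foldl, PySem.Set.update] using h
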